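-- pv_equiv track=rewrite | github.com/qqweqwqweqwe/todoapp | 프로그래머스/단계2/n^2 배열 만들기.py | solution
-- ===== SOURCE A (Python) =====
-- def solution(n, left, right):
--   answer = []
--   standard=left//n
--   for i in range(left, right+1):
--     if standard!=i//n:
--       standard=i//n
--     if standard<=i%n:
--       answer.append(standard+1)
--     else:
--       answer.append(n)
--   return answer
-- ===== SOURCE B (Python) =====
-- def solution(n, left, right):
--     answer = []
--     if right < left:
--         return answer
--     r0 = left // n
--     r1 = right // n
--     for r in range(r0, r1 + 1):
--         lo = left - r * n if r == r0 else 0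
--         hi = right - r * n + 1 if r == r1 else n
--         m = min(max(r, lo), hi)
--         answer += [n] * (m - lo) + [r + 1] * (hi - m)
--     return answer
-- ===== Notes on version B (the rewrite author's own statement) =====
-- stated objective: alternative
-- what changed: B reconstructs the answer row by row, emitting each row's two constant run-length segments ([n]*cnt and [r+1]*cnt) with clipped column ranges, instead of A's per-flat-index scan that tracks and compares a 'standard' row variable at every index.
-- outside the precondition, e.g. on solution(0, 0, 2): A raises ZeroDivisionError, B raises ZeroDivisionError; on solution(-3, 0, 5): A returns [1, -3, 0, 0, -1, -1], B returns []
import Mathlib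
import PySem

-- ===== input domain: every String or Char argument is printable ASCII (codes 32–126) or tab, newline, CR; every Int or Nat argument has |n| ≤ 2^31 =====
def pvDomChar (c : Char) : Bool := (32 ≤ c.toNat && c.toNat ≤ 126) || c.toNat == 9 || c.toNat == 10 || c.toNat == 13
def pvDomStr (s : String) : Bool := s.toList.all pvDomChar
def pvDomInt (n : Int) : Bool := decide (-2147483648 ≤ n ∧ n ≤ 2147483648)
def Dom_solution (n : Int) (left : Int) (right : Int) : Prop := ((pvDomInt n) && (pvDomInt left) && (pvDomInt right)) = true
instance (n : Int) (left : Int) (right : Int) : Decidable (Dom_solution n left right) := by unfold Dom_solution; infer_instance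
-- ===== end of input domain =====

-- B rebuilds the answer row by row with run-length segments instead of scanning every flat index (objective: alternative decomposition).

-- ===== PORT A =====
def solution (n : Int) (left : Int) (right : Int) : List Int :=
  ((PySem.List.pyRange left (right + 1) 1).foldl
    (fun (st : Int × List Int) i =>
      let standard := if st.1 ≠ PySem.Int.floordiv i n then PySem.Int.floordiv i n else st.1
      if standard ≤ PySem.Int.mod i n then (standard, st.2 ++ [standard + 1])
      else (standard, st.2 ++ [n]))
    (PySem.Int.floordiv left n, [])).2

-- ===== PORT B =====
def solution_alt (n : Int) (left : Int) (right : Int) : List Int :=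
  if right < left then []
  else
    let r0 := PySem.Int.floordiv left n
    let r1 := PySem.Int.floordiv right n
    (PySem.List.pyRange r0 (r1 + 1) 1).foldl
      (fun ans r =>
        let lo := if r = r0 then left - r * n else 0
        let hi := if r = r1 then right - r * n + 1 else n
        let m := min (max r lo) hi
        ans ++ (List.replicate (m - lo).toNat n ++ List.replicate (hi - m).toNat (r + 1)))
      []

-- ===== PRECONDITION & SPEC =====
-- Pre_ restricts to the problem's natural domain 1 ≤ n (n is the matrix size), plus the
-- empty-range case right < left for any n ≠ 0: A raises ZeroDivisionError at n = 0, and for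
-- negative n with a nonempty index range it returns values of a nonexistent matrix.
def Pre_solution (n : Int) (left : Int) (right : Int) : Prop := 1 ≤ n ∨ (n ≠ 0 ∧ right < left)
instance (n : Int) (left : Int) (right : Int) : Decidable (Pre_solution n left right) := by unfold Pre_solution; infer_instance
def pvWitness_solution : Int × Int × Int := (3, 0, 8)

def Spec_solution (n : Int) (left : Int) (right : Int) (out : List Int) : Prop := out = solution_alt n left right
instance (n : Int) (left : Int) (right : Int) (out : List Int) : Decidable (Spec_solution n left right out) := by unfold Spec_solution; infer_instance

-- ===== CLAIM (what is proved, stated in full; the proofs are below) =====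
def Claim_equal_solution : Prop := ∀ (n : Int) (left : Int) (right : Int), Dom_solution n left right → Pre_solution n left right → Spec_solution n left right (solution n left right)

-- ===== LEMMAS AND PROOFS =====

-- the per-index value both programs produce
def pvCell (n i : Int) : Int :=
  if PySem.Int.floordiv i n ≤ PySem.Int.mod i n then PySem.Int.floordiv i n + 1 else n

theorem solutionA_foldl (n : Int) (L : List Int) (st : Int) (acc : List Int) :
    (L.foldl
      (fun (st : Int × List Int) i =>
        let standard := if st.1 ≠ PySem.Int.floordiv i n then PySem.Int.floordiv i n else st.1
        if standard ≤ PySem.Int.mod i n then (standard, st.2 ++ [standard + 1])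
        else (standard, st.2 ++ [n]))
      (st, acc)).2 = acc ++ L.map (pvCell n) := by
  induction L generalizing st acc with
  | nil => simp
  | cons x xs ih =>
    have hstd : (if st ≠ PySem.Int.floordiv x n then PySem.Int.floordiv x n else st)
        = PySem.Int.floordiv x n := by
      by_cases h : st = PySem.Int.floordiv x n <;> simp [h]
    by_cases h : PySem.Int.floordiv x n ≤ PySem.Int.mod x n <;>
      · simp only [List.foldl_cons, hstd, if_pos, h, ite_false]
        rw [ih]
        simp [pvCell, h]

theorem solutionA_eq_map (n left right : Int) :
    solution n left right = (PySem.List.pyRange left (right + 1) 1).map (pvCell n) := by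
  unfold solution
  rw [solutionA_foldl]
  simp

-- a contiguous range mapped through a threshold test is two replicate runs
theorem map_ite_threshold (c x y : Int) : ∀ (k : Nat) (a b : Int), b - a = (k : Int) →
    (PySem.List.pyRange a b 1).map (fun i => if c ≤ i then x else y)
      = List.replicate (min (max c a) b - a).toNat y
        ++ List.replicate (b - min (max c a) b).toNat x := by
  intro k
  induction k with
  | zero =>
    intro a b h
    rw [PySem.List.pyRange_one_eq_nil (by omega)]
    have h1 : (min (max c a) b - a).toNat = 0 := by omega
    have h2 : (b - min (max c a) b).toNat = 0 := by omega
    simp only [h1, h2, List.replicate_zero, List.append_nil, List.map_nil]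
  | succ k ih =>
    intro a b h
    have hab : a < b := by omega
    rw [PySem.List.pyRange_one_cons hab, List.map_cons, ih (a + 1) b (by omega)]
    by_cases hc : c ≤ a
    · have e1 : max c a = a := by omega
      have e2 : max c (a + 1) = a + 1 := by omega
      have m1 : min a b = a := by omega
      have m2 : min (a + 1) b = a + 1 := by omega
      simp only [e1, e2, m1, m2, if_pos hc]
      have h1 : (a - a).toNat = 0 := by omega
      have h2 : (a + 1 - (a + 1)).toNat = 0 := by omega
      have h3 : (b - a).toNat = (b - (a + 1)).toNat + 1 := by omega
      simp [h1, h2, h3, List.replicate_succ]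
    · have e1 : max c a = c := by omega
      have e2 : max c (a + 1) = c := by omega
      have hm : a + 1 ≤ min c b := by omega
      have h1 : (min c b - a).toNat = (min c b - (a + 1)).toNat + 1 := by omega
      simp only [e1, e2, if_neg hc]
      simp [h1, List.replicate_succ]

-- every index of row r maps through pvCell to the threshold test at r*n + r
theorem pvCell_row (n r i : Int) (hn : 1 ≤ n) (h1 : r * n ≤ i) (h2 : i < r * n + n) :
    pvCell n i = if r * n + r ≤ i then r + 1 else n := by
  have hfd : PySem.Int.floordiv i n = r := by
    rw [PySem.Int.floordiv_eq_iff_of_pos (by omega)]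
    constructor <;> nlinarith
  have hmod : PySem.Int.mod i n = i - r * n := by
    have := PySem.Int.floordiv_mul_add_mod i n
    rw [hfd] at this
    omega
  unfold pvCell
  rw [hfd, hmod]
  by_cases h : r * n + r ≤ i
  · rw [if_pos (by omega), if_pos h]
  · rw [if_neg (by omega), if_neg h]

-- one row's slice [a, b) of the flat range equals B's two run-length segments
theorem row_segment (n r a b : Int) (hn : 1 ≤ n) (hra : r * n ≤ a) (hab : a ≤ b)
    (hbn : b ≤ r * n + n) :
    (PySem.List.pyRange a b 1).map (pvCell n)
      = List.replicate (min (max r (a - r * n)) (b - r * n) - (a - r * n)).toNat n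
        ++ List.replicate ((b - r * n) - min (max r (a - r * n)) (b - r * n)).toNat (r + 1) := by
  have hmap : (PySem.List.pyRange a b 1).map (pvCell n)
      = (PySem.List.pyRange a b 1).map (fun i => if r * n + r ≤ i then r + 1 else n) := by
    apply List.map_congr_left
    intro i hi
    rw [PySem.List.mem_pyRange_one] at hi
    exact pvCell_row n r i hn (by omega) (by omega)
  rw [hmap, map_ite_threshold (r * n + r) (r + 1) n (b - a).toNat a b (by omega)]
  congr 2 <;> omega

-- the row fold of B (from any starting row block) equals the flat-range map
theorem rows_eq (n : Int) (hn : 1 ≤ n) : ∀ (k : Nat) (l right : Int), l ≤ right →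
    PySem.Int.floordiv right n - PySem.Int.floordiv l n = (k : Int) →
    (PySem.List.pyRange (PySem.Int.floordiv l n) (PySem.Int.floordiv right n + 1) 1).flatMap
      (fun r =>
        let lo := if r = PySem.Int.floordiv l n then l - r * n else 0
        let hi := if r = PySem.Int.floordiv right n then right - r * n + 1 else n
        List.replicate (min (max r lo) hi - lo).toNat n
          ++ List.replicate (hi - min (max r lo) hi).toNat (r + 1))
      = (PySem.List.pyRange l (right + 1) 1).map (pvCell n) := by
  intro k
  induction k with
  | zero =>
    intro l right hlr h
    set r0 := PySem.Int.floordiv l n with hr0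
    have heq : PySem.Int.floordiv right n = r0 := by omega
    have hl : r0 * n ≤ l ∧ l < (r0 + 1) * n := by
      rw [hr0, ← PySem.Int.floordiv_eq_iff_of_pos (by omega)]
    have hr : r0 * n ≤ right ∧ right < (r0 + 1) * n := by
      rw [← heq, ← PySem.Int.floordiv_eq_iff_of_pos (by omega)]
    rw [heq, PySem.List.pyRange_one_cons (by omega), PySem.List.pyRange_one_eq_nil (by omega)]
    simp only [List.flatMap_cons, List.flatMap_nil, List.append_nil, if_true]
    rw [row_segment n r0 l (right + 1) hn (by omega) (by omega) (by nlinarith)]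
    congr 2 <;> omega
  | succ k ih =>
    intro l right hlr h
    set r0 := PySem.Int.floordiv l n with hr0
    set r1 := PySem.Int.floordiv right n with hr1
    have hl : r0 * n ≤ l ∧ l < (r0 + 1) * n := by
      rw [hr0, ← PySem.Int.floordiv_eq_iff_of_pos (by omega)]
    have hr : r1 * n ≤ right ∧ right < (r1 + 1) * n := by
      rw [hr1, ← PySem.Int.floordiv_eq_iff_of_pos (by omega)]
    have hr0r1 : r0 + 1 ≤ r1 := by omega
    have hnext : PySem.Int.floordiv ((r0 + 1) * n) n = r0 + 1 := by
      rw [PySem.Int.floordiv_eq_iff_of_pos (by omega)]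
      constructor
      · omega
      · nlinarith
    have hle : (r0 + 1) * n ≤ right := by nlinarith
    rw [PySem.List.pyRange_one_cons (show r0 < r1 + 1 by omega), List.flatMap_cons]
    -- split the flat range at the end of row r0
    have hsplit : PySem.List.pyRange l (right + 1) 1
        = PySem.List.pyRange l ((r0 + 1) * n) 1 ++ PySem.List.pyRange ((r0 + 1) * n) (right + 1) 1 :=
      PySem.List.pyRange_one_append l ((r0 + 1) * n) (right + 1) (by omega) (by omega)
    rw [hsplit, List.map_append]
    -- first row
    have hrow : (PySem.List.pyRange l ((r0 + 1) * n) 1).map (pvCell n)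
        = List.replicate (min (max r0 (l - r0 * n)) n - (l - r0 * n)).toNat n
          ++ List.replicate (n - min (max r0 (l - r0 * n)) n).toNat (r0 + 1) := by
      rw [row_segment n r0 l ((r0 + 1) * n) hn (by omega) (by nlinarith) (by nlinarith)]
      congr 2 <;> [skip; skip] <;>
        · have : (r0 + 1) * n - r0 * n = n := by ring
          omega
    -- remaining rows via IH at l' = (r0+1)*n
    have htail := ih ((r0 + 1) * n) right hle (by rw [hnext]; omega)
    rw [hnext] at htail
    have hcong : (PySem.List.pyRange (r0 + 1) (r1 + 1) 1).flatMap
        (fun r =>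
          let lo := if r = r0 then l - r * n else 0
          let hi := if r = r1 then right - r * n + 1 else n
          List.replicate (min (max r lo) hi - lo).toNat n
            ++ List.replicate (hi - min (max r lo) hi).toNat (r + 1))
        = (PySem.List.pyRange (r0 + 1) (r1 + 1) 1).flatMap
        (fun r =>
          let lo := if r = r0 + 1 then (r0 + 1) * n - r * n else 0
          let hi := if r = r1 then right - r * n + 1 else n
          List.replicate (min (max r lo) hi - lo).toNat n
            ++ List.replicate (hi - min (max r lo) hi).toNat (r + 1)) := by
      apply List.flatMap_congr
      intro r hrmem
      rw [PySem.List.mem_pyRange_one] at hrmem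
      have h1 : ¬ r = r0 := by omega
      by_cases h2 : r = r0 + 1
      · subst h2
        simp [h1]
      · simp only [if_neg h1, if_neg h2]
    rw [hcong, htail, hrow]
    simp [show ¬ r0 = r1 from by omega, List.append_assoc]

theorem floordiv_le_floordiv (n a b : Int) (hn : 1 ≤ n) (h : a ≤ b) :
    PySem.Int.floordiv a n ≤ PySem.Int.floordiv b n := by
  have ha : PySem.Int.floordiv a n * n ≤ a ∧ a < (PySem.Int.floordiv a n + 1) * n := by
    rw [← PySem.Int.floordiv_eq_iff_of_pos (by omega)]
  have hb : PySem.Int.floordiv b n * n ≤ b ∧ b < (PySem.Int.floordiv b n + 1) * n := by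
    rw [← PySem.Int.floordiv_eq_iff_of_pos (by omega)]
  by_contra hc
  push_neg at hc
  nlinarith

-- ===== VERDICT (by name: the statement is the Claim_ definition above) =====
theorem solution_spec : Claim_equal_solution := by
  intro n left right _ hpre
  unfold Spec_solution
  rw [solutionA_eq_map]
  unfold solution_alt
  by_cases hlr : right < left
  · rw [if_pos hlr, PySem.List.pyRange_one_eq_nil (by omega)]
    simp
  · rw [if_neg hlr]
    push_neg at hlr
    have hn : 1 ≤ n := by
      rcases hpre with h | h
      · exact h
      · omega
    simp only []
    rw [PySem.List.foldl_append_eq_flatMap, List.nil_append]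
    exact (rows_eq n hn (PySem.Int.floordiv right n - PySem.Int.floordiv left n).toNat left right hlr
      (by have := floordiv_le_floordiv n left right hn hlr; omega)).symm
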